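-- pv_equiv track=rewrite | github.com/byte-jn/life-game | replace_umlauts.py | replace_umlauts
-- ===== SOURCE A (Python) =====
-- def replace_umlauts(data):
--     if isinstance(data, str):
--         data = (data.replace("(Ae)", "Ä")
--         .replace("(ae)", "ä")
--         .replace("(Oe)", "Ö")
--         .replace("(oe)", "ö")
--         .replace("(Ue)", "Ü")
--         .replace("(ue)", "ü")
--         .replace("(sz)", "ß"))
--     elif isinstance(data, dict):
--         for key, value in data.items():
--             data[key] = replace_umlauts(value)
--     elif isinstance(data, list):
--         for i in range(len(data)):
--             data[i] = replace_umlauts(data[i])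
--     return data
-- ===== SOURCE B (Python) =====
-- _UMLAUTS = {"(Ae)": "\u00c4", "(ae)": "\u00e4", "(Oe)": "\u00d6",
--             "(oe)": "\u00f6", "(Ue)": "\u00dc", "(ue)": "\u00fc",
--             "(sz)": "\u00df"}
--
--
-- def replace_umlauts(data):
--     if isinstance(data, str):
--         out = []
--         i = 0
--         n = len(data)
--         while i < n:
--             rep = _UMLAUTS.get(data[i:i + 4])
--             if rep is not None:
--                 out.append(rep)
--                 i += 4
--             else:
--                 out.append(data[i])
--                 i += 1
--         return "".join(out)
--     elif isinstance(data, dict):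
--         return {key: replace_umlauts(value) for key, value in data.items()}
--     elif isinstance(data, list):
--         return [replace_umlauts(item) for item in data]
--     return data
-- ===== Notes on version B (the rewrite author's own statement) =====
-- stated objective: alternative
-- what changed: Seven sequential full-string .replace() passes are replaced by a single left-to-right scan that looks each 4-char window up in a token table once, emitting output in one pass; dict/list branches rebuild instead of mutating in place.
import Mathlib
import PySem

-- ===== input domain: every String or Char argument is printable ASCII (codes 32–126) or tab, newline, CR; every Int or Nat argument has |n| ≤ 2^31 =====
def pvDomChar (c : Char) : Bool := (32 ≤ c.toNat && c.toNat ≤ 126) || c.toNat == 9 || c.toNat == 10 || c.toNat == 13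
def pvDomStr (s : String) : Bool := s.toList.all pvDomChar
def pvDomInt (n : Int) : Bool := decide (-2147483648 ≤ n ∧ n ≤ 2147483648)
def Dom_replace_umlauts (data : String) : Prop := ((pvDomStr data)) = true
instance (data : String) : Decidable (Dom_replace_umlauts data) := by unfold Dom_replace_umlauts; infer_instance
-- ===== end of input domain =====

-- B replaces A's seven sequential .replace() passes by one left-to-right scan with a
-- 4-char-window table lookup (objective: alternative single-pass algorithm).
-- Equivalence is about the RETURN value; on the String domain proved here neither
-- program mutates its argument (A's in-place dict/list branches are unreachable).

-- ===== PORT A =====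
def replace_umlauts (data : String) : String :=
  PySem.Str.replace
    (PySem.Str.replace
      (PySem.Str.replace
        (PySem.Str.replace
          (PySem.Str.replace
            (PySem.Str.replace
              (PySem.Str.replace data "(Ae)" "Ä")
              "(ae)" "ä")
            "(Oe)" "Ö")
          "(oe)" "ö")
        "(Ue)" "Ü")
      "(ue)" "ü")
    "(sz)" "ß"

-- ===== PORT B =====
-- B's _UMLAUTS table (keys as 4-char lists, values the single replacement char)
def umlautTable : List (List Char × Char) :=
  [(['(', 'A', 'e', ')'], 'Ä'), (['(', 'a', 'e', ')'], 'ä'),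
   (['(', 'O', 'e', ')'], 'Ö'), (['(', 'o', 'e', ')'], 'ö'),
   (['(', 'U', 'e', ')'], 'Ü'), (['(', 'u', 'e', ')'], 'ü'),
   (['(', 's', 'z', ')'], 'ß')]

-- B's while-loop: look the 4-char window data[i:i+4] up; on a hit emit the
-- replacement and advance 4, otherwise emit data[i] and advance 1.
def scanTable (ps : List (List Char × Char)) : List Char → List Char
  | [] => []
  | c :: t =>
    match List.lookup (c :: t.take 3) ps with
    | some r => r :: scanTable ps (t.drop 3)
    | none => c :: scanTable ps t
termination_by l => l.length
decreasing_by all_goals simp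

def replace_umlauts_alt (data : String) : String :=
  String.ofList (scanTable umlautTable data.toList)

-- ===== PRECONDITION & SPEC =====
def Spec_replace_umlauts (data : String) (out : String) : Prop := out = replace_umlauts_alt data
instance (data : String) (out : String) : Decidable (Spec_replace_umlauts data out) := by unfold Spec_replace_umlauts; infer_instance

-- ===== CLAIM (what is proved, stated in full; the proofs are below) =====
def Claim_equal_replace_umlauts : Prop := ∀ (data : String), Dom_replace_umlauts data → Spec_replace_umlauts data (replace_umlauts data)

-- ===== LEMMAS AND PROOFS =====

-- Clean structural form of one Python str.replace pass (old nonempty).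
def rep1 (old new : List Char) : List Char → List Char
  | [] => []
  | c :: t =>
    if old.isPrefixOf (c :: t) then new ++ rep1 old new (t.drop (old.length - 1))
    else c :: rep1 old new t
termination_by l => l.length
decreasing_by all_goals simp

theorem replace_go_eq_rep1 (old new : List Char) (hold : old ≠ []) :
    ∀ fuel l acc, l.length ≤ fuel →
      PySem.Chars.replace.go old new fuel l acc = acc.reverse ++ rep1 old new l := by
  intro fuel
  induction fuel with
  | zero =>
    intro l acc hl
    have : l = [] := List.eq_nil_of_length_eq_zero (Nat.le_zero.mp hl)
    subst this
    simp [PySem.Chars.replace.go, rep1]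
  | succ f ih =>
    intro l acc hl
    match l with
    | [] => simp [PySem.Chars.replace.go, rep1]
    | c :: t =>
      rw [PySem.Chars.replace.go]
      by_cases hp : old.isPrefixOf (c :: t)
      · rw [if_pos hp]
        have h1 : 1 ≤ old.length := by
          cases old with
          | nil => exact absurd rfl hold
          | cons a b => simp
        have hlen : (List.drop old.length (c :: t)).length ≤ f := by
          simp only [List.length_drop, List.length_cons] at *
          omega
        rw [ih _ _ hlen]
        have hdr : List.drop old.length (c :: t) = t.drop (old.length - 1) := by
          cases old with
          | nil => exact absurd rfl hold
          | cons a b => simp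
        rw [hdr, rep1, if_pos hp]
        simp
      · rw [if_neg hp]
        have hlen : t.length ≤ f := by simp at hl; omega
        rw [ih _ _ hlen, rep1, if_neg hp]
        simp

theorem replace_eq_rep1 (s old new : List Char) (hold : old ≠ []) :
    PySem.Chars.replace s old new = rep1 old new s := by
  rw [PySem.Chars.replace]
  rw [if_neg (by simp [hold])]
  exact replace_go_eq_rep1 old new hold s.length s [] (le_refl _)

-- shape equations
theorem scanTable_nil_eq (ps : List (List Char × Char)) : scanTable ps [] = [] := by
  rw [scanTable]

theorem scanTable_cons_some (ps : List (List Char × Char)) (c : Char) (t : List Char)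
    (r : Char) (h : List.lookup (c :: t.take 3) ps = some r) :
    scanTable ps (c :: t) = r :: scanTable ps (t.drop 3) := by
  rw [scanTable, h]

theorem scanTable_cons_none (ps : List (List Char × Char)) (c : Char) (t : List Char)
    (h : List.lookup (c :: t.take 3) ps = none) :
    scanTable ps (c :: t) = c :: scanTable ps t := by
  rw [scanTable, h]

theorem rep1_nil_eq (old new : List Char) : rep1 old new [] = [] := by
  rw [rep1]

theorem rep1_cons_pos (old new : List Char) (c : Char) (t : List Char)
    (h : old <+: c :: t) :
    rep1 old new (c :: t) = new ++ rep1 old new (t.drop (old.length - 1)) := by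
  rw [rep1, if_pos (List.isPrefixOf_iff_prefix.mpr h)]

theorem rep1_cons_neg (old new : List Char) (c : Char) (t : List Char)
    (h : ¬ old <+: c :: t) :
    rep1 old new (c :: t) = c :: rep1 old new t := by
  rw [rep1, if_neg (by rw [List.isPrefixOf_iff_prefix]; exact h)]

-- a successful lookup names a pair of the table
theorem lookup_some_mem {k : List Char} {ps : List (List Char × Char)} {r : Char}
    (h : List.lookup k ps = some r) : ∃ p ∈ ps, p.1 = k ∧ p.2 = r := by
  induction ps with
  | nil => simp [List.lookup] at h
  | cons p ps ih =>
    rw [List.lookup] at h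
    by_cases hk : (k == p.1) = true
    · rw [hk] at h
      have hk' : k = p.1 := by simpa using hk
      have hr : p.2 = r := by simpa using h
      exact ⟨p, by simp, hk'.symm, hr⟩
    · rw [Bool.not_eq_true] at hk
      rw [hk] at h
      obtain ⟨q, hq, h1, h2⟩ := ih h
      exact ⟨q, by simp [hq], h1, h2⟩

theorem lookup_append_of_some (ps : List (List Char × Char)) (q : List Char × Char)
    (k : List Char) (r : Char) (h : List.lookup k ps = some r) :
    List.lookup k (ps ++ [q]) = some r := by
  induction ps with
  | nil => simp [List.lookup] at h
  | cons p ps ih =>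
    rw [List.cons_append, List.lookup]
    rw [List.lookup] at h
    by_cases hk : (k == p.1) = true
    · rw [hk] at h ⊢; exact h
    · rw [Bool.not_eq_true] at hk
      rw [hk] at h ⊢
      exact ih h

theorem lookup_append_of_none (ps : List (List Char × Char)) (q : List Char × Char)
    (k : List Char) (h : List.lookup k ps = none) :
    List.lookup k (ps ++ [q]) = List.lookup k [q] := by
  induction ps with
  | nil => simp
  | cons p ps ih =>
    rw [List.cons_append, List.lookup]
    rw [List.lookup] at h
    by_cases hk : (k == p.1) = true
    · rw [hk] at h; simp at h
    · rw [Bool.not_eq_true] at hk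
      rw [hk] at h ⊢
      exact ih h

-- Keys starting '(' never match a window whose first char is not '('.
theorem lookup_none_of_head_ne (ps : List (List Char × Char))
    (hks : ∀ p ∈ ps, p.1.head? = some '(') (c : Char) (hc : c ≠ '(') (t : List Char) :
    List.lookup (c :: t) ps = none := by
  induction ps with
  | nil => rfl
  | cons p ps ih =>
    rw [List.lookup]
    have hhd := hks p (by simp)
    have : ((c :: t) == p.1) = false := by
      match hp : p.1 with
      | [] => simp [hp] at hhd
      | a :: u =>
        rw [hp] at hhd
        simp at hhd
        simp [hhd]
        intro h
        exact absurd h hc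
    rw [this]
    exact ih (fun q hq => hks q (by simp [hq]))

-- The scan copies a block of non-'(' chars verbatim.
theorem scanTable_append_of_no_paren (ps : List (List Char × Char))
    (hks : ∀ p ∈ ps, p.1.head? = some '(') :
    ∀ (w t : List Char), (∀ c ∈ w, c ≠ '(') →
      scanTable ps (w ++ t) = w ++ scanTable ps t := by
  intro w
  induction w with
  | nil => intro t _; rfl
  | cons c w ih =>
    intro t hw
    rw [List.cons_append,
        scanTable_cons_none ps c (w ++ t)
          (lookup_none_of_head_ne ps hks c (hw c (by simp)) _),
        ih t (fun d hd => hw d (by simp [hd]))]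
    rfl

-- If the scan's output starts with a block of chars none of which is a
-- replacement char of the table, the input started with that block.
theorem prefix_of_scanTable (ps : List (List Char × Char)) :
    ∀ (t w : List Char), (∀ c ∈ w, ∀ p ∈ ps, c ≠ p.2) →
      w <+: scanTable ps t → w <+: t := by
  intro t
  induction t using scanTable.induct (ps := ps) with
  | case1 =>
    intro w _ h
    rwa [scanTable_nil_eq] at h
  | case2 c t r hl ih =>
    intro w hw h
    rw [scanTable_cons_some ps c t r hl] at h
    match w with
    | [] => exact List.nil_prefix
    | d :: w' =>
      exfalso
      have hd : d = r := (List.cons_prefix_cons.mp h).1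
      obtain ⟨p, hp, _, hpr⟩ := lookup_some_mem hl
      exact hw d (by simp) p hp (hd.trans hpr.symm)
  | case3 c t hl ih =>
    intro w hw h
    rw [scanTable_cons_none ps c t hl] at h
    match w with
    | [] => exact List.nil_prefix
    | d :: w' =>
      obtain ⟨hd, hw'⟩ := List.cons_prefix_cons.mp h
      exact hd ▸ List.cons_prefix_cons.mpr
        ⟨rfl, ih w' (fun e he p hp => hw e (by simp [he]) p hp) hw'⟩

-- MAIN STEP: one more sequential replace pass over the scan of a smaller table
-- equals the scan of the table extended with the new token.
theorem rep1_scanTable_step (ps : List (List Char × Char)) (w : List Char) (r : Char)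
    (hks : ∀ p ∈ ps, p.1.head? = some '(')
    (hreps : ∀ p ∈ ps, p.2 ≠ '(')
    (hwlen : w.length = 3)
    (hwpar : ∀ c ∈ w, c ≠ '(')
    (hwrep : ∀ c ∈ w, ∀ p ∈ ps, c ≠ p.2) :
    ∀ l, rep1 ('(' :: w) [r] (scanTable ps l) = scanTable (ps ++ [('(' :: w, r)]) l := by
  intro l
  induction l using scanTable.induct (ps := ps ++ [('(' :: w, r)]) with
  | case1 => rw [scanTable_nil_eq, scanTable_nil_eq, rep1_nil_eq]
  | case2 c t rr hl ih =>
    -- the extended table matched the window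
    rw [scanTable_cons_some _ c t rr hl]
    by_cases hold : ∃ r0, List.lookup (c :: t.take 3) ps = some r0
    · -- a key of ps matched (so rr is its replacement)
      obtain ⟨r0, h0⟩ := hold
      have : rr = r0 := by
        rw [lookup_append_of_some ps _ _ r0 h0] at hl
        simpa using hl.symm
      subst this
      rw [scanTable_cons_some ps c t rr h0]
      obtain ⟨p, hp, _, hpr⟩ := lookup_some_mem h0
      rw [rep1_cons_neg]
      · rw [ih]
      · intro hpre
        have := (List.cons_prefix_cons.mp hpre).1
        exact hreps p hp (hpr ▸ this.symm)
    · -- the new token matched the window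
      have h0 : List.lookup (c :: t.take 3) ps = none := by
        match h' : List.lookup (c :: t.take 3) ps with
        | none => rfl
        | some r0 => exact absurd ⟨r0, h'⟩ hold
      have hwin : c :: t.take 3 = '(' :: w := by
        rw [lookup_append_of_none ps _ _ h0] at hl
        rw [List.lookup] at hl
        by_cases hk : ((c :: t.take 3) == ('(' :: w)) = true
        · simpa using hk
        · rw [Bool.not_eq_true] at hk
          rw [hk] at hl
          simp [List.lookup] at hl
      have hrr : rr = r := by
        rw [lookup_append_of_none ps _ _ h0, List.lookup] at hl
        rw [show ((c :: t.take 3) == ('(' :: w)) = true from by simp [hwin]] at hl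
        simpa using hl.symm
      subst hrr
      have hc : c = '(' := (List.cons.injEq .. ▸ hwin).1
      have htk : t.take 3 = w := (List.cons.injEq .. ▸ hwin).2
      have ht : t = w ++ t.drop 3 := by
        conv_lhs => rw [← List.take_append_drop 3 t]
        rw [htk]
      rw [scanTable_cons_none ps c t h0]
      have hscan : scanTable ps t = w ++ scanTable ps (t.drop 3) := by
        conv_lhs => rw [ht]
        exact scanTable_append_of_no_paren ps hks w (t.drop 3) hwpar
      rw [hscan, hc, rep1_cons_pos]
      · have hdrop : (w ++ scanTable ps (t.drop 3)).drop (('(' :: w).length - 1)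
            = scanTable ps (t.drop 3) := by
          have : ('(' :: w).length - 1 = w.length := by simp
          rw [this, List.drop_left]
        rw [hdrop, ih]
        rfl
      · exact List.cons_prefix_cons.mpr ⟨rfl, List.prefix_append w _⟩
  | case3 c t hl ih =>
    -- no match at all in the extended table
    have h0 : List.lookup (c :: t.take 3) ps = none := by
      match h' : List.lookup (c :: t.take 3) ps with
      | none => rfl
      | some r0 => rw [lookup_append_of_some ps _ _ r0 h'] at hl; simp at hl
    have hne : c :: t.take 3 ≠ '(' :: w := by
      intro hwin
      rw [lookup_append_of_none ps _ _ h0, List.lookup,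
          show ((c :: t.take 3) == ('(' :: w)) = true from by simp [hwin]] at hl
      simp at hl
    rw [scanTable_cons_none _ c t hl, scanTable_cons_none ps c t h0]
    rw [rep1_cons_neg]
    · rw [ih]
    · intro hpre
      obtain ⟨hch, hwp⟩ := List.cons_prefix_cons.mp hpre
      have hwt : w <+: t := prefix_of_scanTable ps t w hwrep hwp
      apply hne
      obtain ⟨u, hu⟩ := hwt
      rw [← hch]
      congr 1
      rw [← hu, ← hwlen, List.take_append_of_le_length (le_refl _), List.take_length]

-- The seven chained passes equal the one-pass table scan (on char lists).
set_option maxRecDepth 8192 in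
theorem chain_eq_scan (l : List Char) :
    rep1 ['(', 's', 'z', ')'] ['ß']
      (rep1 ['(', 'u', 'e', ')'] ['ü']
        (rep1 ['(', 'U', 'e', ')'] ['Ü']
          (rep1 ['(', 'o', 'e', ')'] ['ö']
            (rep1 ['(', 'O', 'e', ')'] ['Ö']
              (rep1 ['(', 'a', 'e', ')'] ['ä']
                (rep1 ['(', 'A', 'e', ')'] ['Ä'] l))))))
    = scanTable umlautTable l := by
  have h0 : scanTable [] l = l := by
    induction l with
    | nil => exact scanTable_nil_eq []
    | cons c t ih => rw [scanTable_cons_none [] c t rfl, ih]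
  have h1 := rep1_scanTable_step [] ['A', 'e', ')'] 'Ä'
    (by decide) (by decide) (by decide) (by simp) (by simp) l
  have h2 := rep1_scanTable_step [(['(', 'A', 'e', ')'], 'Ä')] ['a', 'e', ')'] 'ä'
    (by decide) (by decide) (by decide) (by simp) (by simp) l
  have h3 := rep1_scanTable_step
    [(['(', 'A', 'e', ')'], 'Ä'), (['(', 'a', 'e', ')'], 'ä')] ['O', 'e', ')'] 'Ö'
    (by decide) (by decide) (by decide) (by simp) (by simp) l
  have h4 := rep1_scanTable_step
    [(['(', 'A', 'e', ')'], 'Ä'), (['(', 'a', 'e', ')'], 'ä'),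
     (['(', 'O', 'e', ')'], 'Ö')] ['o', 'e', ')'] 'ö'
    (by decide) (by decide) (by decide) (by simp) (by simp) l
  have h5 := rep1_scanTable_step
    [(['(', 'A', 'e', ')'], 'Ä'), (['(', 'a', 'e', ')'], 'ä'),
     (['(', 'O', 'e', ')'], 'Ö'), (['(', 'o', 'e', ')'], 'ö')] ['U', 'e', ')'] 'Ü'
    (by decide) (by decide) (by decide) (by simp) (by simp) l
  have h6 := rep1_scanTable_step
    [(['(', 'A', 'e', ')'], 'Ä'), (['(', 'a', 'e', ')'], 'ä'),
     (['(', 'O', 'e', ')'], 'Ö'), (['(', 'o', 'e', ')'], 'ö'),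
     (['(', 'U', 'e', ')'], 'Ü')] ['u', 'e', ')'] 'ü'
    (by decide) (by decide) (by decide) (by simp) (by simp) l
  have h7 := rep1_scanTable_step
    [(['(', 'A', 'e', ')'], 'Ä'), (['(', 'a', 'e', ')'], 'ä'),
     (['(', 'O', 'e', ')'], 'Ö'), (['(', 'o', 'e', ')'], 'ö'),
     (['(', 'U', 'e', ')'], 'Ü'), (['(', 'u', 'e', ')'], 'ü')] ['s', 'z', ')'] 'ß'
    (by decide) (by decide) (by decide) (by simp) (by simp) l
  rw [h0] at h1
  simp only [List.nil_append, List.cons_append ] at h1 h2 h3 h4 h5 h6 h7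
  rw [show umlautTable =
    [(['(', 'A', 'e', ')'], 'Ä'), (['(', 'a', 'e', ')'], 'ä'),
     (['(', 'O', 'e', ')'], 'Ö'), (['(', 'o', 'e', ')'], 'ö'),
     (['(', 'U', 'e', ')'], 'Ü'), (['(', 'u', 'e', ')'], 'ü'),
     (['(', 's', 'z', ')'], 'ß')] from rfl]
  rw [h1, h2, h3, h4, h5, h6, h7]

-- ===== VERDICT (by name: the statement is the Claim_ definition above) =====
theorem replace_umlauts_spec : Claim_equal_replace_umlauts := by
  intro data _
  unfold Spec_replace_umlauts replace_umlauts replace_umlauts_alt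
  rw [← String.toList_inj]
  simp only [PySem.Str.toList_replace]
  rw [replace_eq_rep1 _ _ _ (by decide), replace_eq_rep1 _ _ _ (by decide),
      replace_eq_rep1 _ _ _ (by decide), replace_eq_rep1 _ _ _ (by decide),
      replace_eq_rep1 _ _ _ (by decide), replace_eq_rep1 _ _ _ (by decide),
      replace_eq_rep1 _ _ _ (by decide)]
  simp only [show "(Ae)".toList = ['(', 'A', 'e', ')'] from rfl,
    show "(ae)".toList = ['(', 'a', 'e', ')'] from rfl,
    show "(Oe)".toList = ['(', 'O', 'e', ')'] from rfl,
    show "(oe)".toList = ['(', 'o', 'e', ')'] from rfl,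
    show "(Ue)".toList = ['(', 'U', 'e', ')'] from rfl,
    show "(ue)".toList = ['(', 'u', 'e', ')'] from rfl,
    show "(sz)".toList = ['(', 's', 'z', ')'] from rfl,
    show "Ä".toList = ['Ä'] from rfl, show "ä".toList = ['ä'] from rfl,
    show "Ö".toList = ['Ö'] from rfl, show "ö".toList = ['ö'] from rfl,
    show "Ü".toList = ['Ü'] from rfl, show "ü".toList = ['ü'] from rfl,
    show "ß".toList = ['ß'] from rfl]
  rw [chain_eq_scan, String.toList_ofList]
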